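-- pv_equiv track=rewrite | github.com/walkccc/LeetCode | solutions/2321. Maximum Score Of Spliced Array/2321.py | maximumsSplicedArray
-- ===== SOURCE A (Python) =====
-- def maximumsSplicedArray(nums1: list[int], nums2: list[int]) -> int:
--   def kadane(nums1: list[int], nums2: list[int]) -> int:
--     """
--     Returns the maximum gain of swapping some numbers in `nums1` with some
--     numbers in `nums2`.
--     """
--     gain = 0
--     maxGain = 0
--
--     for num1, num2 in zip(nums1, nums2):
--       gain = max(0, gain + num2 - num1)
--       maxGain = max(maxGain, gain)
--
--     return maxGain + sum(nums1)
--
--   return max(kadane(nums1, nums2), kadane(nums2, nums1))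
-- ===== SOURCE B (Python) =====
-- def maximumsSplicedArray(nums1: list[int], nums2: list[int]) -> int:
--   # Prefix-sum formulation: let P be the prefix sums of the difference array
--   # nums2 - nums1.  The best gain for swapping into nums1 is the maximum
--   # "rise" max_{i<=j} P[j] - P[i], and for the other direction the maximum
--   # "drawdown" max_{i<=j} P[i] - P[j].  No Kadane clamp is involved.
--   prefix = [0]
--   p = 0
--   for a, b in zip(nums1, nums2):
--     p += b - a
--     prefix.append(p)
--   lo = hi = rise = drop = 0
--   for q in prefix:
--     lo = min(lo, q)
--     hi = max(hi, q)
--     rise = max(rise, q - lo)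
--     drop = max(drop, hi - q)
--   return max(sum(nums1) + rise, sum(nums2) + drop)
-- ===== Notes on version B (the rewrite author's own statement) =====
-- stated objective: alternative
-- what changed: Replaced A's two clamp-at-zero Kadane passes by a prefix-sum formulation: build the prefix sums of the difference array, then a running-min/running-max scan over that prefix curve computes the maximum rise and maximum drawdown, which are exactly the two swap gains.
import Mathlib
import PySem

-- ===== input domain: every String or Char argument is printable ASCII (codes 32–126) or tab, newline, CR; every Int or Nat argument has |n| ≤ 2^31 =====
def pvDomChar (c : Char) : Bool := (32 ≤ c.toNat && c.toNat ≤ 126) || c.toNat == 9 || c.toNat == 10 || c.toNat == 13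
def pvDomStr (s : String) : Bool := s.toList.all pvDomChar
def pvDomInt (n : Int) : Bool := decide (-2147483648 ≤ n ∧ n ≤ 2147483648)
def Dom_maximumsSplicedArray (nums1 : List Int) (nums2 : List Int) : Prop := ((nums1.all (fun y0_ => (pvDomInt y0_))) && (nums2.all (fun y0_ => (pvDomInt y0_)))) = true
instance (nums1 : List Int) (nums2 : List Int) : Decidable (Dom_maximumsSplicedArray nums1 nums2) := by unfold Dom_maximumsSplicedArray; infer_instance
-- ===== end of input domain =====

-- B replaces A's two clamp-at-zero Kadane passes by a prefix-sum formulation: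
-- maximum rise / maximum drawdown over the prefix curve of the difference array.
-- ===== PORT A =====
def pvKadaneA (nums1 : List Int) (nums2 : List Int) : Int :=
  let st := (nums1.zip nums2).foldl
    (fun (p : Int × Int) ab =>
      let gain := max 0 (p.1 + ab.2 - ab.1)
      (gain, max p.2 gain)) (0, 0)
  st.2 + nums1.sum

def maximumsSplicedArray (nums1 : List Int) (nums2 : List Int) : Int :=
  max (pvKadaneA nums1 nums2) (pvKadaneA nums2 nums1)

-- ===== PORT B =====
-- first loop of Source B: append the running prefix sum of the differences
def pvBuildB (st : List Int × Int) (ab : Int × Int) : List Int × Int :=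
  let p := st.2 + (ab.2 - ab.1)
  (st.1 ++ [p], p)

-- second loop of Source B: running min/max over the prefix curve, best rise and drop
def pvScanB (st : Int × Int × Int × Int) (q : Int) : Int × Int × Int × Int :=
  let lo := min st.1 q
  let hi := max st.2.1 q
  let rise := max st.2.2.1 (q - lo)
  let drop := max st.2.2.2 (hi - q)
  (lo, hi, rise, drop)

def maximumsSplicedArray_alt (nums1 : List Int) (nums2 : List Int) : Int :=
  let built := (nums1.zip nums2).foldl pvBuildB ([0], 0)
  let st := built.1.foldl pvScanB (0, 0, 0, 0)
  max (nums1.sum + st.2.2.1) (nums2.sum + st.2.2.2)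

-- ===== PRECONDITION & SPEC =====
def Spec_maximumsSplicedArray (nums1 : List Int) (nums2 : List Int) (out : Int) : Prop := out = maximumsSplicedArray_alt nums1 nums2
instance (nums1 : List Int) (nums2 : List Int) (out : Int) : Decidable (Spec_maximumsSplicedArray nums1 nums2 out) := by unfold Spec_maximumsSplicedArray; infer_instance

-- ===== CLAIM (what is proved, stated in full; the proofs are below) =====
def Claim_equal_maximumsSplicedArray : Prop := ∀ (nums1 : List Int) (nums2 : List Int), Dom_maximumsSplicedArray nums1 nums2 → Spec_maximumsSplicedArray nums1 nums2 (maximumsSplicedArray nums1 nums2)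

-- ===== LEMMAS AND PROOFS =====

def pvDiff (ab : Int × Int) : Int := ab.2 - ab.1

-- the prefix sums of ds starting from current value c (excluding c itself)
def pvPrefFrom : Int → List Int → List Int
  | _, [] => []
  | c, d :: t => (c + d) :: pvPrefFrom (c + d) t

def pvStepA (p : Int × Int) (ab : Int × Int) : Int × Int :=
  let gain := max 0 (p.1 + ab.2 - ab.1)
  (gain, max p.2 gain)

-- A's kadane fold seen over the difference values
def pvKadStep (p : Int × Int) (d : Int) : Int × Int :=
  let g := max 0 (p.1 + d)
  (g, max p.2 g)

def pvKadStepNeg (p : Int × Int) (d : Int) : Int × Int :=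
  let g := max 0 (p.1 - d)
  (g, max p.2 g)

theorem build_eq (l : List (Int × Int)) : ∀ (pref : List Int) (c : Int),
    (l.foldl pvBuildB (pref, c)).1 = pref ++ pvPrefFrom c (l.map pvDiff) := by
  induction l with
  | nil => intro pref c; simp [pvPrefFrom]
  | cons ab t ih =>
      intro pref c
      simp only [List.foldl_cons, List.map_cons, pvBuildB, pvPrefFrom, pvDiff]
      rw [ih]; simp

theorem foldA_eq (l : List (Int × Int)) : ∀ (g m : Int),
    l.foldl pvStepA (g, m) = (l.map pvDiff).foldl pvKadStep (g, m) := by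
  induction l with
  | nil => intro g m; rfl
  | cons ab t ih =>
      intro g m
      simp only [List.foldl_cons, List.map_cons, pvStepA, pvKadStep, pvDiff]
      rw [ih]; congr 2 <;> omega

theorem foldA_swap (l : List (Int × Int)) : ∀ (g m : Int),
    (l.map Prod.swap).foldl pvStepA (g, m) = (l.map pvDiff).foldl pvKadStepNeg (g, m) := by
  induction l with
  | nil => intro g m; rfl
  | cons ab t ih =>
      intro g m
      simp only [List.map_cons, List.foldl_cons, pvStepA, pvKadStepNeg, pvDiff, Prod.swap]
      rw [ih]; congr 2 <;> omega

-- main invariant: scanning the prefixes from c with running lo/hi computes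
-- both kadane results, where gain = c - lo and gain' = hi - c
theorem scan_main (ds : List Int) : ∀ (c lo hi rise drop : Int), lo ≤ c → c ≤ hi →
    ((pvPrefFrom c ds).foldl pvScanB (lo, hi, rise, drop)).2.2.1
        = (ds.foldl pvKadStep (c - lo, rise)).2
    ∧ ((pvPrefFrom c ds).foldl pvScanB (lo, hi, rise, drop)).2.2.2
        = (ds.foldl pvKadStepNeg (hi - c, drop)).2 := by
  induction ds with
  | nil => intro c lo hi rise drop _ _; exact ⟨rfl, rfl⟩
  | cons d t ih =>
      intro c lo hi rise drop hlo hhi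
      simp only [pvPrefFrom, List.foldl_cons, pvScanB, pvKadStep, pvKadStepNeg]
      have h1 : max 0 (c - lo + d) = c + d - min lo (c + d) := by omega
      have h2 : max 0 (hi - c - d) = max hi (c + d) - (c + d) := by omega
      rw [h1, h2]
      exact ih (c + d) (min lo (c + d)) (max hi (c + d))
        (max rise (c + d - min lo (c + d))) (max drop (max hi (c + d) - (c + d)))
        (by omega) (by omega)

-- ===== VERDICT (by name: the statement is the Claim_ definition above) =====
theorem maximumsSplicedArray_spec : Claim_equal_maximumsSplicedArray := by
  intro nums1 nums2 _
  unfold Spec_maximumsSplicedArray maximumsSplicedArray maximumsSplicedArray_alt pvKadaneA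
  have hA : ∀ l : List (Int × Int), l.foldl pvStepA (0, 0)
      = l.foldl (fun (p : Int × Int) ab => let gain := max 0 (p.1 + ab.2 - ab.1); (gain, max p.2 gain)) (0, 0) := fun _ => rfl
  simp only [← hA]
  have hswap : (nums2.zip nums1) = (nums1.zip nums2).map Prod.swap := by
    rw [List.zip_swap]
  have hb : ((nums1.zip nums2).foldl pvBuildB ([0], 0)).1
      = 0 :: pvPrefFrom 0 ((nums1.zip nums2).map pvDiff) := by
    rw [build_eq]; rfl
  have hscan0 : (0 :: pvPrefFrom 0 ((nums1.zip nums2).map pvDiff)).foldl pvScanB (0, 0, 0, 0)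
      = (pvPrefFrom 0 ((nums1.zip nums2).map pvDiff)).foldl pvScanB (0, 0, 0, 0) := by
    simp [List.foldl_cons, pvScanB]
  have hmain := scan_main ((nums1.zip nums2).map pvDiff) 0 0 0 0 0 le_rfl le_rfl
  rw [foldA_eq, hswap, foldA_swap, hb]
  simp only [hscan0]
  have h0 : (0 : Int) - 0 = 0 := rfl
  rw [h0] at hmain
  rw [hmain.1, hmain.2]
  omega
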